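-- pv_equiv track=rewrite | github.com/AbrhamAb/workConnect | C_Prefix_Max.py | calc
-- ===== SOURCE A (Python) =====
-- def calc(a):
--     max = 0
--     res = 0
--     for x in a:
--         if x > max:
--             max = x
--         res += max
--     return res
-- ===== SOURCE B (Python) =====
-- def calc(a):
--     # Divide and conquer: solve each half recursively; go(seg, m) returns
--     # (sum of prefix maxima of seg with baseline m, max(m, elements of seg)),
--     # and the left half's max becomes the right half's baseline.
--     def go(seg, m):
--         if not seg:
--             return (0, m)
--         if len(seg) == 1:
--             mm = seg[0] if seg[0] > m else m
--             return (mm, mm)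
--         mid = len(seg) // 2
--         s1, m1 = go(seg[:mid], m)
--         s2, m2 = go(seg[mid:], m1)
--         return (s1 + s2, m2)
--     return go(a, 0)[0]
-- ===== Notes on version B (the rewrite author's own statement) =====
-- stated objective: alternative
-- what changed: B replaces A's single fused accumulator loop by a divide-and-conquer recursion: each half is solved recursively and the left half's maximum is threaded as the baseline for the right half.
import Mathlib
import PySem

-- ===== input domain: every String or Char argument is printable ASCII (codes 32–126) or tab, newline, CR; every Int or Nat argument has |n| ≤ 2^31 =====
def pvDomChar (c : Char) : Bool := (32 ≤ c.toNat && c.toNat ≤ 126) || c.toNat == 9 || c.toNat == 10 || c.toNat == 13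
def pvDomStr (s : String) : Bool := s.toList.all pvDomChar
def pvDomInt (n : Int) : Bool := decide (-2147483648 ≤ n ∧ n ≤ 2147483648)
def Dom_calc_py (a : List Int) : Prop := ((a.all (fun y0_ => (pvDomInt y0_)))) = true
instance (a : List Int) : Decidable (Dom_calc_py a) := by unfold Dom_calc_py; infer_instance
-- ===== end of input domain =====

-- B replaces A's fused loop by divide and conquer on list halves (alternative decomposition; no speed claim).

-- ===== PORT A =====
-- A: single loop keeping (max, res), res += current max each step.
def calc_py (a : List Int) : Int :=
  (a.foldl (fun (s : Int × Int) x =>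
    let m := if x > s.1 then x else s.1
    (m, s.2 + m)) (0, 0)).2

-- ===== PORT B =====
-- B's go: returns (sum of prefix maxima of seg with baseline m, running max after seg).
def calcGo (seg : List Int) (m : Int) : Int × Int :=
  match _h : seg with
  | [] => (0, m)
  | [x] => let mm := if x > m then x else m; (mm, mm)
  | _ :: _ :: _ =>
    let mid := seg.length / 2
    let p := calcGo (seg.take mid) m
    let q := calcGo (seg.drop mid) p.2
    (p.1 + q.1, q.2)
termination_by seg.length
decreasing_by
  · simp_all; omega
  · simp_all; omega

def calc_py_alt (a : List Int) : Int := (calcGo a 0).1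

-- ===== PRECONDITION & SPEC =====
def Spec_calc_py (a : List Int) (out : Int) : Prop := out = calc_py_alt a
instance (a : List Int) (out : Int) : Decidable (Spec_calc_py a out) := by unfold Spec_calc_py; infer_instance

-- ===== CLAIM (what is proved, stated in full; the proofs are below) =====
def Claim_equal_calc_py : Prop := ∀ (a : List Int), Dom_calc_py a → Spec_calc_py a (calc_py a)

-- ===== LEMMAS AND PROOFS =====
-- the step function of the running max
def maxf (m x : Int) : Int := if x > m then x else m

-- reference recursion: sum of prefix maxima with baseline m
def refS : List Int → Int → Int
  | [], _ => 0
  | x :: t, m => maxf m x + refS t (maxf m x)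

theorem refS_append : ∀ (s t : List Int) (m : Int),
    refS (s ++ t) m = refS s m + refS t (s.foldl maxf m) := by
  intro s
  induction s with
  | nil => intro t m; simp [refS]
  | cons x s ih => intro t m; simp only [List.cons_append, refS, List.foldl_cons, ih]; ring

theorem calcGo_eq_aux : ∀ (n : Nat) (seg : List Int), seg.length ≤ n → ∀ m, calcGo seg m = (refS seg m, seg.foldl maxf m) := by
  intro n
  induction n with
  | zero =>
    intro seg h m
    have : seg = [] := List.eq_nil_of_length_eq_zero (Nat.le_zero.mp h)
    subst this; simp [calcGo, refS]
  | succ n ih =>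
    intro seg h m
    match seg with
    | [] => simp [calcGo, refS]
    | [x] => simp [calcGo, refS, maxf]
    | a :: b :: t =>
      rw [calcGo]
      have hlen : (a :: b :: t).length = t.length + 2 := by simp
      have h1 : ((a :: b :: t).take ((a :: b :: t).length / 2)).length ≤ n := by
        simp only [List.length_take, hlen] at *; omega
      have h2 : ((a :: b :: t).drop ((a :: b :: t).length / 2)).length ≤ n := by
        simp only [List.length_drop, hlen] at *; omega
      rw [ih _ h1, ih _ h2]
      have hsplit := List.take_append_drop ((a :: b :: t).length / 2) (a :: b :: t)
      conv_rhs => rw [← hsplit]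
      rw [refS_append, List.foldl_append]

theorem calcGo_eq (seg : List Int) (m : Int) :
    calcGo seg m = (refS seg m, seg.foldl maxf m) :=
  calcGo_eq_aux seg.length seg le_rfl m

-- A's loop equals r + refS
theorem calcA_eq : ∀ (t : List Int) (m r : Int),
    (t.foldl (fun (s : Int × Int) x =>
      let m := if x > s.1 then x else s.1
      (m, s.2 + m)) (m, r)).2 = r + refS t m := by
  intro t
  induction t with
  | nil => intro m r; simp [refS]
  | cons x t ih => intro m r; simp only [List.foldl, refS, maxf, ih]; ring

-- ===== VERDICT (by name: the statement is the Claim_ definition above) =====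
theorem calc_py_spec : Claim_equal_calc_py := by
  intro a _
  unfold Spec_calc_py calc_py calc_py_alt
  rw [calcA_eq, calcGo_eq]
  simp
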